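-- pv_equiv track=rewrite | github.com/gravitrix/Scrapers | leetcode-scraper/leetcode-scraper.py | filter_submissions
-- ===== SOURCE A (Python) =====
-- def filter_submissions(submissions):
--     def better_of(s1, s2):
--         if s2[3] == 'N/A':
--             return s1
--         elif s1[3] == 'N/A':
--             return s2
--         else:
--             t1 = int(s1[3].split()[0])
--             t2 = int(s2[3].split()[0])
--             return s2 if t1 > t2 else s1
--     submissions_to_save = dict()
--     for submission in submissions:
--         problem_name = submission[1]
--         if submissions_to_save.get(problem_name) is None:
--             submissions_to_save[problem_name] = submission
--         else:
--             submissions_to_save[problem_name] = better_of(submissions_to_save[problem_name], submission)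
--     return submissions_to_save
-- ===== SOURCE B (Python) =====
-- def filter_submissions(submissions):
--     groups = {}
--     for s in submissions:
--         groups.setdefault(s[1], []).append(s)
--
--     def key(s):
--         return (1, 0) if s[3] == 'N/A' else (0, int(s[3].split()[0]))
--
--     return {name: g[0] if len(g) == 1 else min(g, key=key)
--             for name, g in groups.items()}
-- ===== Notes on version B (the rewrite author's own statement) =====
-- stated objective: alternative
-- what changed: Instead of folding a running best per name with a pairwise better_of comparator, B first groups all submissions by problem name in one pass and then selects each group's earliest-minimum with a single stable min under a tuple key that ranks 'N/A' worst (singleton groups are taken as-is without parsing).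
-- outside the precondition, e.g. on filter_submissions([['a', 'p'], ['b', 'p', 'y', 'N/A']]): A returns {'p': ['a', 'p']}, B raises IndexError
import Mathlib
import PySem

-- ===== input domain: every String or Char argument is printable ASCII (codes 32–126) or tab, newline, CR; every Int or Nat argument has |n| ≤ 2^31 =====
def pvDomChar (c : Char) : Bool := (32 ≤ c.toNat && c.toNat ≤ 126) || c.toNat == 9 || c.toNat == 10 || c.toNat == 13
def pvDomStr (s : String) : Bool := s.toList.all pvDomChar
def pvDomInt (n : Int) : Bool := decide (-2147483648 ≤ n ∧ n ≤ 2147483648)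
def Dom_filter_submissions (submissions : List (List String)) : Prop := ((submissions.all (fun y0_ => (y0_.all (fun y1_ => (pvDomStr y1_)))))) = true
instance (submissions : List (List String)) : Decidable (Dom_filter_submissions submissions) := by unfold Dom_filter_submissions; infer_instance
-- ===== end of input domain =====

-- B groups submissions by problem name in one pass and then takes each group's stable minimum
-- under a tuple key ranking 'N/A' worst, instead of A's running-best fold with a pairwise comparator.

-- shared field accessors: submission[1], submission[3], int(t.split()[0])  (totalised with a
-- default outside Pre_, where the Python raises)
def pvName (s : List String) : String := (PySem.List.pyGet? s 1).getD ""
def pvT (s : List String) : String := (PySem.List.pyGet? s 3).getD ""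
def pvParse (t : String) : Int := (PySem.Int.ofStr? ((PySem.Str.split₀ t).headD "")).getD 0

-- ===== PORT A =====
def pvBetterOf (s1 s2 : List String) : List String :=
  if pvT s2 = "N/A" then s1
  else if pvT s1 = "N/A" then s2
  else
    let t1 := pvParse (pvT s1)
    let t2 := pvParse (pvT s2)
    if t1 > t2 then s2 else s1

-- one iteration of A's loop: look up the current best for the name, insert the better of the two
def pvStepA (d : PySem.Dict String (List String)) (sub : List String) : PySem.Dict String (List String) :=
  match d.get? (pvName sub) with
  | none => d.insert (pvName sub) sub
  | some prev => d.insert (pvName sub) (pvBetterOf prev sub)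

def filter_submissions (submissions : List (List String)) : List (String × List String) :=
  (submissions.foldl pvStepA PySem.Dict.empty).items

-- ===== PORT B =====
-- Source B's tuple key (1, 0) if s[3] == 'N/A' else (0, int(s[3].split()[0])), as the two components
def pvKey1 (s : List String) : Int := if pvT s = "N/A" then 1 else 0
def pvKey2 (s : List String) : Int := if pvT s = "N/A" then 0 else pvParse (pvT s)

-- Source B's  g[0] if len(g) == 1 else min(g, key=key)
def pvBest (g : List (List String)) : List String :=
  if g.length == 1 then g.headD [] else (PySem.List.min2? g pvKey1 pvKey2).getD []

-- one iteration of Source B's grouping loop: groups.setdefault(s[1], []).append(s)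
def pvStepG (g : PySem.Dict String (List (List String))) (s : List String) :
    PySem.Dict String (List (List String)) :=
  g.insert (pvName s) (g.getD (pvName s) [] ++ [s])

def pvSel (p : String × List (List String)) : String × List String := (p.1, pvBest p.2)

def filter_submissions_alt (submissions : List (List String)) : List (String × List String) :=
  ((submissions.foldl pvStepG PySem.Dict.empty).items).map pvSel

-- ===== PRECONDITION & SPEC =====
-- Pre_ excludes lists where some submission needed for a name lookup is shorter than 2 fields
-- (A raises IndexError), and lists where a submission whose problem name occurs more than once
-- has fewer than 4 fields or a time field that is neither 'N/A' nor int-parsable: there A raises,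
-- or returns only by the accident of better_of short-circuiting on a later 'N/A' entry, while B
-- (which keys every member of a multi-submission group) raises.
def Pre_filter_submissions (submissions : List (List String)) : Prop :=
  ∀ s ∈ submissions, 2 ≤ s.length ∧
    (1 < submissions.countP (fun t => pvName t == pvName s) →
      4 ≤ s.length ∧ (pvT s = "N/A" ∨
        (PySem.Int.ofStr? ((PySem.Str.split₀ (pvT s)).headD "")).isSome = true))
instance (submissions : List (List String)) : Decidable (Pre_filter_submissions submissions) := by
  unfold Pre_filter_submissions; infer_instance

def pvWitness_filter_submissions : List (List String) :=
  [["1", "two-sum", "py", "12 ms"], ["2", "two-sum", "py", "N/A"], ["3", "lru", "py", "x"]]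

def Spec_filter_submissions (submissions : List (List String)) (out : List (String × List String)) : Prop := out = filter_submissions_alt submissions
instance (submissions : List (List String)) (out : List (String × List String)) : Decidable (Spec_filter_submissions submissions out) := by unfold Spec_filter_submissions; infer_instance

-- ===== CLAIM (what is proved, stated in full; the proofs are below) =====
def Claim_equal_filter_submissions : Prop := ∀ (submissions : List (List String)), Dom_filter_submissions submissions → Pre_filter_submissions submissions → Spec_filter_submissions submissions (filter_submissions submissions)

-- ===== LEMMAS AND PROOFS =====

-- pvSel keeps keys, so lookups through the selected dict are lookups in the grouping dict
theorem pv_get?_mk_map (l : List (String × List (List String))) (k : String) :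
    (PySem.Dict.mk (l.map pvSel)).get? k = ((PySem.Dict.mk l).get? k).map pvBest := by
  simp only [PySem.Dict.get?, List.find?_map]
  have h : ((fun p : String × List String => p.1 == k) ∘ pvSel)
      = (fun p : String × List (List String) => p.1 == k) := rfl
  rw [h, Option.map_map, Option.map_map]
  rfl

theorem pv_contains_mk_map (l : List (String × List (List String))) (k : String) :
    (PySem.Dict.mk (l.map pvSel)).contains k = (PySem.Dict.mk l).contains k := by
  simp only [PySem.Dict.contains, List.any_map]
  rfl

theorem pv_contains_eq_isSome {ν : Type} (d : PySem.Dict String ν) (k : String) :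
    d.contains k = (d.get? k).isSome := by
  simp [PySem.Dict.contains, PySem.Dict.get?, List.isSome_find?]

-- A's comparator is exactly one step of Source B's stable min under the tuple key
theorem pv_betterOf_eq_step (m s : List String) :
    pvBetterOf m s =
      (if (decide (pvKey1 s < pvKey1 m) ||
           (!decide (pvKey1 m < pvKey1 s) && decide (pvKey2 s < pvKey2 m))) = true
       then s else m) := by
  unfold pvBetterOf pvKey1 pvKey2
  by_cases h2 : pvT s = "N/A" <;> by_cases h1 : pvT m = "N/A" <;>
    simp [h1, h2]

theorem pv_min2?_cons_ne_none (x : List String) (l : List (List String)) :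
    PySem.List.min2? (x :: l) pvKey1 pvKey2 ≠ none := by
  show List.foldl _ (some x) l ≠ none
  induction l generalizing x with
  | nil => simp
  | cons y t ih =>
    simp only [List.foldl_cons]
    split <;> exact ih _

theorem pv_best_eq_min2? (g : List (List String)) (h : g ≠ []) :
    pvBest g = (PySem.List.min2? g pvKey1 pvKey2).getD [] := by
  unfold pvBest
  split
  · rename_i hl
    match g, hl with
    | [x], _ => rfl
  · rfl

-- the crux: appending a submission to a nonempty group commutes the stable min with better_of
theorem pv_best_append (g : List (List String)) (s : List String) (h : g ≠ []) :
    pvBest (g ++ [s]) = pvBetterOf (pvBest g) s := by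
  obtain ⟨x, l, rfl⟩ : ∃ x l, g = x :: l := by
    cases g with
    | nil => exact absurd rfl h
    | cons x l => exact ⟨x, l, rfl⟩
  obtain ⟨m, hm⟩ : ∃ m, PySem.List.min2? (x :: l) pvKey1 pvKey2 = some m :=
    Option.ne_none_iff_exists'.mp (pv_min2?_cons_ne_none x l)
  have hlen : ((x :: l ++ [s]).length == 1) = false := by
    simp [List.length_append]
  have happ : PySem.List.min2? (x :: l ++ [s]) pvKey1 pvKey2 =
      (if (decide (pvKey1 s < pvKey1 m) ||
           (!decide (pvKey1 m < pvKey1 s) && decide (pvKey2 s < pvKey2 m))) = true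
       then some s else some m) := by
    show List.foldl _ none (x :: l ++ [s]) = _
    rw [show (x :: l ++ [s]) = (x :: l) ++ [s] by simp, List.foldl_append]
    have : List.foldl _ none (x :: l) = some m := hm
    rw [this]
    rfl
  have hb : pvBest (x :: l) = m := by
    rw [pv_best_eq_min2? _ (by simp), hm]; rfl
  rw [hb, pv_betterOf_eq_step]
  unfold pvBest
  rw [hlen]
  simp only [Bool.false_eq_true, if_false, happ]
  split <;> rfl

-- loop invariant: A's dict is the grouping dict with each group replaced by its best,
-- and every group in the grouping dict is nonempty
theorem pv_inv (xs : List (List String)) :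
    (xs.foldl pvStepA PySem.Dict.empty) =
      PySem.Dict.mk (((xs.foldl pvStepG PySem.Dict.empty)).items.map pvSel)
    ∧ ∀ p ∈ (xs.foldl pvStepG PySem.Dict.empty).items, p.2 ≠ [] := by
  induction xs using List.reverseRecOn with
  | nil => exact ⟨rfl, by simp [PySem.Dict.empty]⟩
  | append_singleton xs s ih =>
    obtain ⟨ihA, ihNE⟩ := ih
    rw [List.foldl_append, List.foldl_append]
    simp only [List.foldl_cons, List.foldl_nil]
    set G := xs.foldl pvStepG PySem.Dict.empty with hG
    rw [ihA]
    cases hget : G.get? (pvName s) with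
    | none =>
      have hc : G.contains (pvName s) = false := by
        rw [pv_contains_eq_isSome, hget]; rfl
      have hstepG : (pvStepG G s).items = G.items ++ [(pvName s, [s])] := by
        unfold pvStepG PySem.Dict.insert
        rw [hc]
        simp [PySem.Dict.getD, hget]
      have hstepA : pvStepA (PySem.Dict.mk (G.items.map pvSel)) s =
          PySem.Dict.mk (G.items.map pvSel ++ [(pvName s, s)]) := by
        unfold pvStepA
        rw [pv_get?_mk_map, hget]
        unfold PySem.Dict.insert
        rw [pv_contains_mk_map, hc]
        rfl
      refine ⟨?_, ?_⟩
      · rw [hstepA, hstepG, List.map_append]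
        rfl
      · intro p hp
        rw [hstepG] at hp
        rcases List.mem_append.mp hp with h | h
        · exact ihNE p h
        · simp at h; simp [h]
    | some g =>
      have hgne : g ≠ [] := by
        have := hget
        unfold PySem.Dict.get? at this
        obtain ⟨pr, hfind, hpr⟩ := Option.map_eq_some_iff.mp this
        have hmem := List.mem_of_find?_eq_some hfind
        have := ihNE pr hmem
        rw [hpr] at this
        exact this
      have hc : G.contains (pvName s) = true := by
        rw [pv_contains_eq_isSome, hget]; rfl
      have hstepG : (pvStepG G s).items =
          G.items.map (fun p => if (p.1 == pvName s) = true then (pvName s, g ++ [s]) else p) := by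
        unfold pvStepG PySem.Dict.insert
        rw [hc]
        simp [PySem.Dict.getD, hget]
      have hstepA : pvStepA (PySem.Dict.mk (G.items.map pvSel)) s =
          PySem.Dict.mk ((G.items.map pvSel).map
            (fun p => if (p.1 == pvName s) = true then (pvName s, pvBetterOf (pvBest g) s) else p)) := by
        unfold pvStepA
        rw [pv_get?_mk_map, hget]
        unfold PySem.Dict.insert
        rw [pv_contains_mk_map, hc]
        rfl
      refine ⟨?_, ?_⟩
      · rw [hstepA, hstepG, List.map_map, List.map_map]
        congr 1
        apply List.map_congr_left
        intro p _
        by_cases hp : (p.1 == pvName s) = true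
        · simp only [Function.comp_apply, hp, if_pos]
          unfold pvSel
          simp only [hp, if_pos]
          rw [pv_best_append g s hgne]
        · simp only [Function.comp_apply, hp]
          simp [pvSel, hp]
      · intro p hp
        rw [hstepG] at hp
        obtain ⟨q, hq, hqp⟩ := List.mem_map.mp hp
        by_cases h : (q.1 == pvName s) = true
        · rw [h] at hqp; simp at hqp; simp [← hqp]
        · rw [if_neg h] at hqp; exact hqp ▸ ihNE q hq

-- ===== VERDICT (by name: the statement is the Claim_ definition above) =====
theorem filter_submissions_spec : Claim_equal_filter_submissions := by
  intro submissions _ _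
  show filter_submissions submissions = filter_submissions_alt submissions
  unfold filter_submissions filter_submissions_alt
  rw [(pv_inv submissions).1]
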